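-- pv_equiv track=rewrite | github.com/tockata/HackBulgaria | week5/2-Course-Status.py | status_count
-- ===== SOURCE A (Python) =====
-- def status_count(students):
--     result = {
--         "finalized": [],
--         "not-finalized": []
--     }
--
--     for student in students:
--         if student["status"] == "finalized":
--             result["finalized"] += [student["name"]]
--         else:
--             result["not-finalized"] += [student["name"]]
--
--     return result
-- ===== SOURCE B (Python) =====
-- def status_count(students):
--     n = len(students)
--     if n == 0:
--         return {"finalized": [], "not-finalized": []}
--     if n == 1:
--         s = students[0]
--         if s["status"] == "finalized":
--             return {"finalized": [s["name"]], "not-finalized": []}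
--         return {"finalized": [], "not-finalized": [s["name"]]}
--     mid = n // 2
--     left = status_count(students[:mid])
--     right = status_count(students[mid:])
--     return {
--         "finalized": left["finalized"] + right["finalized"],
--         "not-finalized": left["not-finalized"] + right["not-finalized"],
--     }
-- ===== Notes on version B (the rewrite author's own statement) =====
-- stated objective: alternative
-- what changed: Replaces A's single sequential branched pass over a mutable dict with a divide-and-conquer recursion: split the list in half, group each half recursively, and concatenate the per-group lists (order preserved since concatenation keeps halves in input order).
import Mathlib
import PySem

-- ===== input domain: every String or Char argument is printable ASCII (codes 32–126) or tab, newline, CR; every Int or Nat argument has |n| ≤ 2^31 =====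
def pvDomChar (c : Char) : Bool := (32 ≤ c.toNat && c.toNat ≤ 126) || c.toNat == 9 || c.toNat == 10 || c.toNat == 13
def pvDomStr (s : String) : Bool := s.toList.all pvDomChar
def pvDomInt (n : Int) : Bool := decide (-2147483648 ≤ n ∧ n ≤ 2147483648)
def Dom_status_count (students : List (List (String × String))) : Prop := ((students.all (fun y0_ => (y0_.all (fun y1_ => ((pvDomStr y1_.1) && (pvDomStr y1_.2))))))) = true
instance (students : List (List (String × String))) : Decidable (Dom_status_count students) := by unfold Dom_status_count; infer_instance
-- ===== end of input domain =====

-- B replaces A's single sequential branched pass over a mutable dict by a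
-- divide-and-conquer recursion (split in half, recurse, concatenate the groups).

-- ===== PORT A =====
-- A: one pass, branching on status and appending to the matching dict entry.
def status_count (students : List (List (String × String))) : List (String × List String) :=
  let result : PySem.Dict String (List String) :=
    PySem.Dict.ofList [("finalized", []), ("not-finalized", [])]
  let result := students.foldl
    (fun r student =>
      let d := PySem.Dict.ofList student
      if (d.get? "status").getD "" == "finalized" then
        r.insert "finalized" (r.getD "finalized" [] ++ [(d.get? "name").getD ""])
      else
        r.insert "not-finalized" (r.getD "not-finalized" [] ++ [(d.get? "name").getD ""]))
    result
  result.items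

-- ===== PORT B =====
-- B: divide and conquer.  students[:mid] / students[mid:] with 0 ≤ mid ≤ n are
-- ported as List.take / List.drop, which are exact for these in-range slices.
def status_count_alt (students : List (List (String × String))) : List (String × List String) :=
  let n := students.length
  if n = 0 then [("finalized", []), ("not-finalized", [])]
  else if n = 1 then
    let s := PySem.Dict.ofList ((PySem.List.pyGet? students 0).getD [])
    if (s.get? "status").getD "" == "finalized" then
      [("finalized", [(s.get? "name").getD ""]), ("not-finalized", [])]
    else
      [("finalized", []), ("not-finalized", [(s.get? "name").getD ""])]
  else
    let mid := n / 2
    let left := status_count_alt (students.take mid)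
    let right := status_count_alt (students.drop mid)
    [("finalized", ((PySem.Dict.mk left).get? "finalized").getD []
        ++ ((PySem.Dict.mk right).get? "finalized").getD []),
     ("not-finalized", ((PySem.Dict.mk left).get? "not-finalized").getD []
        ++ ((PySem.Dict.mk right).get? "not-finalized").getD [])]
  termination_by students.length
  decreasing_by
  · simp [List.length_take]; omega
  · simp [List.length_drop]; omega

-- ===== PRECONDITION & SPEC =====
-- Pre_ excludes exactly the inputs on which A raises KeyError: a student record
-- missing the "status" or "name" key.
def Pre_status_count (students : List (List (String × String))) : Prop :=
  ∀ s ∈ students, (PySem.Dict.ofList s).contains "status" = true ∧ (PySem.Dict.ofList s).contains "name" = true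
instance (students : List (List (String × String))) : Decidable (Pre_status_count students) := by unfold Pre_status_count; infer_instance
def pvWitness_status_count : (List (List (String × String))) :=
  [[("status", "finalized"), ("name", "Ana")], [("status", "no"), ("name", "Bo")]]
def Spec_status_count (students : List (List (String × String))) (out : List (String × List String)) : Prop := out = status_count_alt students
instance (students : List (List (String × String))) (out : List (String × List String)) : Decidable (Spec_status_count students out) := by unfold Spec_status_count; infer_instance

-- ===== CLAIM (what is proved, stated in full; the proofs are below) =====
def Claim_equal_status_count : Prop := ∀ (students : List (List (String × String))), Dom_status_count students → Pre_status_count students → Spec_status_count students (status_count students)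

-- ===== LEMMAS AND PROOFS =====

def pvFin (students : List (List (String × String))) : List String :=
  students.filterMap (fun s =>
    let d := PySem.Dict.ofList s
    if (d.get? "status").getD "" == "finalized" then some ((d.get? "name").getD "") else none)

def pvNf (students : List (List (String × String))) : List String :=
  students.filterMap (fun s =>
    let d := PySem.Dict.ofList s
    if (d.get? "status").getD "" != "finalized" then some ((d.get? "name").getD "") else none)

lemma status_count_loop (l : List (List (String × String))) (f n : List String) :
    (l.foldl
      (fun r student =>
        let d := PySem.Dict.ofList student
        if (d.get? "status").getD "" == "finalized" then
          r.insert "finalized" (r.getD "finalized" [] ++ [(d.get? "name").getD ""])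
        else
          r.insert "not-finalized" (r.getD "not-finalized" [] ++ [(d.get? "name").getD ""]))
      (PySem.Dict.mk [("finalized", f), ("not-finalized", n)])).items
    = [("finalized", f ++ pvFin l), ("not-finalized", n ++ pvNf l)] := by
  induction l generalizing f n with
  | nil => simp [pvFin, pvNf]
  | cons s t ih =>
    simp only [List.foldl_cons]
    by_cases h : ((PySem.Dict.ofList s).get? "status").getD "" == "finalized"
    · have hins : (PySem.Dict.mk [("finalized", f), ("not-finalized", n)]).insert "finalized"
          ((PySem.Dict.mk [("finalized", f), ("not-finalized", n)]).getD "finalized" []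
            ++ [((PySem.Dict.ofList s).get? "name").getD ""])
          = PySem.Dict.mk [("finalized", f ++ [((PySem.Dict.ofList s).get? "name").getD ""]), ("not-finalized", n)] := by
        apply PySem.Dict.ext
        simp [PySem.Dict.items_insert, PySem.Dict.getD_eq_get?_getD, PySem.Dict.get?_mk_cons]
      rw [if_pos h, hins, ih]
      have h' : ((PySem.Dict.ofList s).get? "status").getD "" = "finalized" := by simpa using h
      simp [pvFin, pvNf, h']
    · have hins : (PySem.Dict.mk [("finalized", f), ("not-finalized", n)]).insert "not-finalized"
          ((PySem.Dict.mk [("finalized", f), ("not-finalized", n)]).getD "not-finalized" []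
            ++ [((PySem.Dict.ofList s).get? "name").getD ""])
          = PySem.Dict.mk [("finalized", f), ("not-finalized", n ++ [((PySem.Dict.ofList s).get? "name").getD ""])] := by
        apply PySem.Dict.ext
        simp [PySem.Dict.items_insert, PySem.Dict.getD_eq_get?_getD, PySem.Dict.get?_mk_cons]
      rw [if_neg (by simpa using h), hins, ih]
      have h' : ¬ ((PySem.Dict.ofList s).get? "status").getD "" = "finalized" := by simpa using h
      simp [pvFin, pvNf, h']

lemma status_count_alt_eq (students : List (List (String × String))) :
    status_count_alt students = [("finalized", pvFin students), ("not-finalized", pvNf students)] := by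
  fun_induction status_count_alt students with
  | case1 students n h =>
    have : students = [] := List.length_eq_zero_iff.mp h
    subst this; simp [pvFin, pvNf]
  | case2 students n h0 h1 s h =>
    obtain ⟨a, ha⟩ := List.length_eq_one_iff.mp h1
    subst ha
    have hs : s = PySem.Dict.ofList a := by
      simp [s, PySem.List.pyGet?, PySem.List.pyIdx?]
    rw [hs] at h
    simp only [beq_iff_eq] at h
    simp [pvFin, pvNf, h, hs]
  | case3 students n h0 h1 s h =>
    obtain ⟨a, ha⟩ := List.length_eq_one_iff.mp h1
    subst ha
    have hs : s = PySem.Dict.ofList a := by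
      simp [s, PySem.List.pyGet?, PySem.List.pyIdx?]
    rw [hs] at h
    simp only [beq_iff_eq] at h
    simp [pvFin, pvNf, h, hs]
  | case4 students n h0 h1 mid left right ihl ihr =>
    have hsplit := List.take_append_drop mid students
    have hf : pvFin students = pvFin (students.take mid) ++ pvFin (students.drop mid) := by
      simp only [pvFin]; rw [← List.filterMap_append, hsplit]
    have hn : pvNf students = pvNf (students.take mid) ++ pvNf (students.drop mid) := by
      simp only [pvNf]; rw [← List.filterMap_append, hsplit]
    simp only [left, right, ihl, ihr, hf, hn, PySem.Dict.get?_mk_cons]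
    simp

-- ===== VERDICT (by name: the statement is the Claim_ definition above) =====
theorem status_count_spec : Claim_equal_status_count := by
  intro students _ _
  show status_count students = status_count_alt students
  have h0 : PySem.Dict.ofList ([("finalized", []), ("not-finalized", [])] : List (String × List String))
      = PySem.Dict.mk [("finalized", []), ("not-finalized", [])] := by decide
  unfold status_count
  rw [h0, status_count_loop, status_count_alt_eq]
  simp [pvFin, pvNf]
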